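-- pv_equiv track=rewrite | github.com/tarikbenaouda/IngeneerWriteUps | luccile/script.py | book4
-- ===== SOURCE A (Python) =====
-- final = lambda k: {"00": "Alpha", "01": "Beta", "10": "lydia", "11": "Gamma"}.get(k)
--
-- def book4(plain):
--     blocks = [ plain[i:i+8] for i in range(0,len(plain), 8)]
--     enc = []
--     for block in blocks:
--         mini_blocks = [ block[i:i+2] for i in range(0,len(block), 2)]
--         sub_enc =[]
--         for k in mini_blocks:
--             sub_enc.append(final(k))
--         enc.append(sub_enc)
--     return enc
-- ===== SOURCE B (Python) =====
-- final = lambda k: {"00": "Alpha", "01": "Beta", "10": "lydia", "11": "Gamma"}.get(k)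
--
-- def book4(plain):
--     pairs = [final(plain[i:i+2]) for i in range(0, len(plain), 2)]
--     return [pairs[j:j+4] for j in range(0, len(pairs), 4)]
-- ===== Notes on version B (the rewrite author's own statement) =====
-- stated objective: simpler
-- what changed: Instead of slicing the string into 8-char blocks and re-slicing each block into 2-char pairs with a nested loop, B maps the whole string to a flat list of pair-codes in one pass and then regroups that flat list into chunks of four; this reproduces the same nesting because block boundaries (8 chars) always align with pair boundaries (2 chars).
import Mathlib
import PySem

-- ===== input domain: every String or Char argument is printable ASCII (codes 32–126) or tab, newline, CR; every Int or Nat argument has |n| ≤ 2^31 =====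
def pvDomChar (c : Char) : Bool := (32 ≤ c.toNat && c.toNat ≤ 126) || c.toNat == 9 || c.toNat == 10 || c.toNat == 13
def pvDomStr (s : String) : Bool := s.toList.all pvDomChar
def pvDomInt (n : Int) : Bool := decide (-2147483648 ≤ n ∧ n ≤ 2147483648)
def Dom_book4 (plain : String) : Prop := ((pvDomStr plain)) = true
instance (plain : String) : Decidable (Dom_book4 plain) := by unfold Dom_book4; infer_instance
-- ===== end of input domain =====

-- B flattens the string into ONE list of pair-codes and regroups it into chunks of four,
-- instead of A's nested 8-char-block / 2-char-pair slicing (objective: simpler decomposition).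

-- ===== PORT A =====
def final (k : String) : Option String :=
  PySem.Dict.get?
    (PySem.Dict.ofList [("00", "Alpha"), ("01", "Beta"), ("10", "lydia"), ("11", "Gamma")]) k

def book4 (plain : String) : List (List (Option String)) :=
  let blocks := (PySem.List.pyRange 0 (PySem.Str.len plain) 8).map
      (fun i => PySem.Str.slice plain (some i) (some (i + 8)))
  blocks.foldl (fun enc block =>
    let mini_blocks := (PySem.List.pyRange 0 (PySem.Str.len block) 2).map
        (fun i => PySem.Str.slice block (some i) (some (i + 2)))
    let sub_enc := mini_blocks.foldl (fun sub_enc k => sub_enc ++ [final k]) []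
    enc ++ [sub_enc]) []

-- ===== PORT B =====
def book4_alt (plain : String) : List (List (Option String)) :=
  let pairs := (PySem.List.pyRange 0 (PySem.Str.len plain) 2).map
      (fun i => final (PySem.Str.slice plain (some i) (some (i + 2))))
  (PySem.List.pyRange 0 (PySem.List.len pairs) 4).map
      (fun j => PySem.List.slice pairs (some j) (some (j + 4)))

-- ===== PRECONDITION & SPEC =====
def Spec_book4 (plain : String) (out : List (List (Option String))) : Prop := out = book4_alt plain
instance (plain : String) (out : List (List (Option String))) : Decidable (Spec_book4 plain out) := by unfold Spec_book4; infer_instance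

-- ===== CLAIM (what is proved, stated in full; the proofs are below) =====
def Claim_equal_book4 : Prop := ∀ (plain : String), Dom_book4 plain → Spec_book4 plain (book4 plain)

-- ===== LEMMAS AND PROOFS =====

-- `final` applied to a string built from a list of chars, as a function of that list.
def final2 (l : List Char) : Option String := final (String.ofList l)

-- Reference form: split into chunks of `s` and apply `g` to each chunk.
def chunksMap {α β : Type} (g : List α → β) (s : Nat) : List α → List β
  | [] => []
  | x :: r => g (x :: r.take (s - 1)) :: chunksMap g s (r.drop (s - 1))
termination_by xs => xs.length
decreasing_by simp

-- Peel the first element off a positive-step range starting at 0 (shifting the rest down by s).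
theorem pyRange_pos_cons (n s : Int) (hs : 0 < s) (h : 0 < n) :
    PySem.List.pyRange 0 n s = 0 :: (PySem.List.pyRange 0 (n - s) s).map (· + s) := by
  have hq : 0 ≤ (n - 1) / s := Int.ediv_nonneg (by omega) (by omega)
  rw [PySem.List.pyRange_of_pos _ _ hs, PySem.List.pyRange_of_pos _ _ hs]
  have h1 : (n - 0 + s - 1) / s = (n - 1) / s + 1 := by
    have he : n - 0 + s - 1 = n - 1 + 1 * s := by ring
    rw [he, Int.add_mul_ediv_right _ _ (show s ≠ 0 by omega)]
  have h2 : (if (0:Int) < n then ((n - 0 + s - 1) / s).toNat else 0) = ((n - 1) / s).toNat + 1 := by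
    rw [if_pos h, h1]; omega
  have h3 : (if (0:Int) < n - s then ((n - s - 0 + s - 1) / s).toNat else 0) = ((n - 1) / s).toNat := by
    by_cases hns : (0:Int) < n - s
    · rw [if_pos hns]
      have he : n - s - 0 + s - 1 = n - 1 := by ring
      rw [he]
    · rw [if_neg hns]
      have : (n - 1) / s = 0 := Int.ediv_eq_zero_of_lt (by omega) (by omega)
      omega
  rw [h2, h3, List.range_succ_eq_map]
  simp only [List.map_cons, List.map_map]
  congr 1
  · simp
  · apply List.map_congr_left
    intro k _
    simp only [Function.comp_apply]
    push_cast
    ring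

theorem pyRange_nonpos (n s : Int) (hs : 0 < s) (h : n ≤ 0) :
    PySem.List.pyRange 0 n s = [] := by
  rw [PySem.List.pyRange_of_pos _ _ hs, if_neg (by omega)]
  simp

-- A step-s slicing comprehension over indices 0, s, 2s, … is chunksMap.
theorem chunk_eq {α β : Type} (g : List α → β) (s : Nat) (hs : 0 < s) :
    ∀ (xs : List α),
      (PySem.List.pyRange 0 (xs.length : Int) (s : Int)).map
          (fun i => g (PySem.List.slice xs (some i) (some (i + (s : Int))))) =
        chunksMap g s xs := by
  intro xs
  induction hN : xs.length using Nat.strong_induction_on generalizing xs with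
  | _ N ih =>
  subst hN
  have hs' : (0:Int) < (s : Int) := by exact_mod_cast hs
  match xs with
  | [] =>
    rw [show (([] : List α).length : Int) = 0 by simp, pyRange_nonpos _ _ hs' le_rfl]
    rw [chunksMap.eq_1]
    rfl
  | x :: r =>
    have hn : (0:Int) < ((x :: r).length : Int) := by
      exact_mod_cast Nat.succ_pos r.length
    rw [pyRange_pos_cons _ _ hs' hn]
    simp only [List.map_cons, List.map_map]
    have hhead : g (PySem.List.slice (x :: r) (some 0) (some (0 + (s:Int)))) =
        g (x :: r.take (s - 1)) := by
      rw [PySem.List.slice_toNat _ le_rfl (by omega)]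
      congr 1
      rw [show ((0:Int) + (s:Int)).toNat = s by omega]
      simp only [Int.toNat_zero, Nat.sub_zero, List.drop_zero]
      rw [show s = (s - 1) + 1 by omega]
      simp
    rw [hhead, chunksMap.eq_2]
    congr 1
    by_cases hb : (x :: r).length ≤ s
    · have h1 : ((x :: r).length : Int) - (s : Int) ≤ 0 := by omega
      rw [pyRange_nonpos _ _ hs' h1]
      have h2 : r.drop (s - 1) = [] := List.drop_eq_nil_of_le (by simp at hb ⊢; omega)
      rw [h2, chunksMap.eq_1]
      rfl
    · rw [not_le] at hb
      set ys := r.drop (s - 1) with hys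
      have hlen : ys.length = (x :: r).length - s := by
        simp [hys]; omega
      have hcast : ((x :: r).length : Int) - (s : Int) = (ys.length : Int) := by
        rw [hlen]
        have hle : s ≤ (x :: r).length := by omega
        push_cast [Nat.cast_sub hle]
        ring
      rw [hcast]
      have hstep : ∀ i ∈ PySem.List.pyRange 0 (ys.length : Int) (s : Int),
          ((fun i => g (PySem.List.slice (x :: r) (some i) (some (i + (s:Int))))) ∘ (· + (s:Int))) i =
            g (PySem.List.slice ys (some i) (some (i + (s : Int)))) := by
        intro i hi
        have h0i : 0 ≤ i := by
          rcases (PySem.List.mem_pyRange_iff_of_pos hs' i).mp hi with ⟨h0, _, _⟩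
          exact h0
        simp only [Function.comp]
        congr 1
        rw [PySem.List.slice_toNat _ (by omega) (by omega),
            PySem.List.slice_toNat _ (by omega) (by omega)]
        have e1 : ((i + (s:Int)) + (s:Int)).toNat - (i + (s:Int)).toNat = s := by omega
        have e2 : (i + (s:Int)).toNat - i.toNat = s := by omega
        rw [e1, e2]
        congr 1
        rw [hys, List.drop_drop]
        have hcons : (x :: r).drop (i + (s:Int)).toNat = r.drop ((i + (s:Int)).toNat - 1) := by
          rw [show (i + (s:Int)).toNat = ((i + (s:Int)).toNat - 1) + 1 by omega]
          simp
        rw [hcons]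
        congr 1
        omega
      rw [List.map_congr_left hstep]
      exact ih ys.length (by simp only [List.length_cons] at hlen ⊢; omega) ys rfl

-- take/drop of a 2-chunking correspond to take/drop of twice as many elements.
theorem chunksMap_two_take {α β : Type} (f : List α → β) :
    ∀ (k : Nat) (ys : List α), (chunksMap f 2 ys).take k = chunksMap f 2 (ys.take (2 * k)) := by
  intro k
  induction k with
  | zero => intro ys; rw [List.take_zero, List.take_zero, chunksMap.eq_1]
  | succ k ih =>
    intro ys
    cases ys with
    | nil => simp [chunksMap.eq_1]
    | cons x r =>
      have h2 : 2 * (k + 1) = (2 * k + 1) + 1 := by omega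
      rw [h2, List.take_succ_cons, chunksMap.eq_2, chunksMap.eq_2, List.take_succ_cons, ih,
        List.take_take, List.drop_take]
      norm_num

theorem chunksMap_two_drop {α β : Type} (f : List α → β) :
    ∀ (k : Nat) (ys : List α), (chunksMap f 2 ys).drop k = chunksMap f 2 (ys.drop (2 * k)) := by
  intro k
  induction k with
  | zero => intro ys; simp
  | succ k ih =>
    intro ys
    cases ys with
    | nil => simp [chunksMap.eq_1]
    | cons x r =>
      have h2 : 2 * (k + 1) = (2 * k + 1) + 1 := by omega
      rw [h2, List.drop_succ_cons, chunksMap.eq_2, List.drop_succ_cons, ih, List.drop_drop]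
      congr 2
      omega

-- Regrouping: 8-char blocks split into pairs = the flat pair list grouped in fours.
theorem regroup {α β : Type} (f : List α → β) :
    ∀ (cs : List α),
      chunksMap (fun bl => chunksMap f 2 bl) 8 cs = chunksMap id 4 (chunksMap f 2 cs) := by
  intro cs
  induction hN : cs.length using Nat.strong_induction_on generalizing cs with
  | _ N ih =>
  subst hN
  match cs with
  | [] => rw [chunksMap.eq_1, chunksMap.eq_1, chunksMap.eq_1]
  | x :: r =>
    rw [chunksMap.eq_2]
    conv_rhs => rw [chunksMap.eq_2, chunksMap.eq_2]
    congr 1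
    · -- heads
      simp only [id_eq, chunksMap.eq_2, chunksMap_two_take, List.take_take, List.drop_take]
      norm_num
    · -- tails
      rw [chunksMap_two_drop, List.drop_drop]
      norm_num
      exact ih (r.drop 7).length (by simp) (r.drop 7) rfl

-- The inner pairs comprehension of A on any string, pushed down to lists of chars.
theorem inner_eq (bs : String) :
    ((PySem.List.pyRange 0 (PySem.Str.len bs) 2).map
        (fun i => PySem.Str.slice bs (some i) (some (i + 2)))).map final =
      chunksMap final2 2 bs.toList := by
  rw [List.map_map]
  have h := chunk_eq final2 2 (by omega) bs.toList
  exact_mod_cast h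

theorem book4_eq_chunks (plain : String) :
    book4 plain = chunksMap (fun bl => chunksMap final2 2 bl) 8 plain.toList := by
  unfold book4
  simp only [PySem.List.foldl_append_singleton_eq_map, List.nil_append]
  have h := chunk_eq (fun bl => chunksMap final2 2 bl) 8 (by omega) plain.toList
  norm_cast at h
  rw [← h, List.map_map]
  have hl : PySem.Str.len plain = (plain.toList.length : Int) := rfl
  rw [hl]
  apply List.map_congr_left
  intro i _
  simp only [Function.comp_apply]
  rw [inner_eq (PySem.Str.slice plain (some i) (some (i + 8)))]
  congr 1
  rw [PySem.Str.toList_slice, PySem.Chars.slice_eq_listSlice]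

theorem book4_alt_eq_chunks (plain : String) :
    book4_alt plain = chunksMap id 4 (chunksMap final2 2 plain.toList) := by
  unfold book4_alt
  have hp : (PySem.List.pyRange 0 (PySem.Str.len plain) 2).map
      (fun i => final (PySem.Str.slice plain (some i) (some (i + 2)))) =
      chunksMap final2 2 plain.toList := by
    have h := chunk_eq final2 2 (by omega) plain.toList
    exact_mod_cast h
  rw [hp]
  have h := chunk_eq (id : List (Option String) → List (Option String)) 4 (by omega)
      (chunksMap final2 2 plain.toList)
  exact_mod_cast h

-- ===== VERDICT (by name: the statement is the Claim_ definition above) =====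
theorem book4_spec : Claim_equal_book4 := by
  intro plain _
  unfold Spec_book4
  rw [book4_eq_chunks, book4_alt_eq_chunks, regroup]
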